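-- pv_equiv track=rewrite | github.com/CAN-Lab-Fudan/High-order-Networks | Higher-order Epidemic Spreading in Simplicial Networks/enumerate_simplices.py | grow_cliques_by_one
-- ===== SOURCE A (Python) =====
-- from typing import Dict, Iterable, List, Set, Tuple
--
-- Node = int
--
-- Clique = Tuple[Node, ...]
--
-- def grow_cliques_by_one(adj: Dict[Node, Set[Node]], cliques_k: List[Clique]) -> List[Clique]:
--     """
--     Expand k-cliques to (k+1)-cliques using common neighbors.
--     Only add nodes greater than the last element in the clique to avoid duplicates.
--     """
--     next_cliques: List[Clique] = []
--     for c in cliques_k: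
--         common = set(adj[c[0]])
--         for u in c[1:]:
--             common &= adj[u]
--         for w in sorted(x for x in common if x > c[-1]):
--             next_cliques.append((*c, w))
--     return next_cliques
-- ===== SOURCE B (Python) =====
-- def grow_cliques_by_one(adj, cliques_k):
--     """Candidate-driven expansion: walk sorted neighbors of the last node and
--     verify membership in every other member's adjacency set."""
--     out = []
--     for c in cliques_k:
--         last = c[-1]
--         rest = c[:-1]
--         for w in sorted(adj[last]):
--             if w > last and all(w in adj[u] for u in rest):
--                 out.append((*c, w))
--     return out
-- ===== Notes on version B (the rewrite author's own statement) =====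
-- stated objective: alternative
-- what changed: Candidate-driven verification: instead of accumulating a running intersection set over all clique members and then sorting the survivors, B walks the sorted neighbor list of the clique's last node and checks each candidate w > last against the other members' adjacency sets directly, maintaining no intersection set.
import Mathlib
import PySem

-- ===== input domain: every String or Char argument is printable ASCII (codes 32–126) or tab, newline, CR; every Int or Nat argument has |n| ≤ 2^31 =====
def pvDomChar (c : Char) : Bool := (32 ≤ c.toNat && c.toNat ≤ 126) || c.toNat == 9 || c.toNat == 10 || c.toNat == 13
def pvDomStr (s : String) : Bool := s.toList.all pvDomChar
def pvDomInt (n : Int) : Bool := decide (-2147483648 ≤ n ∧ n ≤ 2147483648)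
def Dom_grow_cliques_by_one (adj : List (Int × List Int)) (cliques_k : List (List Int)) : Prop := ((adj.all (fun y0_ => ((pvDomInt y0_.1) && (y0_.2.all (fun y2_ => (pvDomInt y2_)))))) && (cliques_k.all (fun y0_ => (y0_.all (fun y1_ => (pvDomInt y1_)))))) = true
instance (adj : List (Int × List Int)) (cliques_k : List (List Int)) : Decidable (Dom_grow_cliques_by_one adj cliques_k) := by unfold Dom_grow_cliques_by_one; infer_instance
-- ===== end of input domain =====

-- B replaces A's accumulate-the-intersection-then-sort strategy by a candidate-driven pass
-- over the sorted neighbors of the clique's last node (objective: alternative, same cost class).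

-- ===== PORT A =====
-- adj[u] on the association-list encoding of the Python dict (first-match lookup; used by both ports)
def pvAdjGet (adj : List (Int × List Int)) (u : Int) : List Int :=
  PySem.Dict.getD (PySem.Dict.mk adj) u []

def grow_cliques_by_one (adj : List (Int × List Int)) (cliques_k : List (List Int)) : List (List Int) :=
  cliques_k.foldl (fun next_cliques c =>
    next_cliques ++
      (PySem.List.sorted
        (((PySem.List.slice c (some 1) none).foldl
            (fun common u => PySem.Set.inter common (pvAdjGet adj u))
            (PySem.Set.ofList (pvAdjGet adj (PySem.List.pyGetD c 0 0)))).filter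
          (fun x => decide (PySem.List.pyGetD c (-1) 0 < x)))
        (fun x => x) false).map (fun w => c ++ [w])) []

-- ===== PORT B =====
def grow_cliques_by_one_alt (adj : List (Int × List Int)) (cliques_k : List (List Int)) : List (List Int) :=
  cliques_k.foldl (fun out c =>
    (PySem.List.sorted (pvAdjGet adj (PySem.List.pyGetD c (-1) 0)) (fun x => x) false).foldl
      (fun out w =>
        if decide (PySem.List.pyGetD c (-1) 0 < w) &&
            (PySem.List.slice c none (some (-1))).all
              (fun u => PySem.Set.contains (pvAdjGet adj u) w)
        then out ++ [c ++ [w]] else out) out) []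

-- ===== PRECONDITION & SPEC =====
-- Pre_ excludes exactly the inputs on which A raises (an empty clique: IndexError on c[0];
-- a clique member missing from adj: KeyError), and requires each adjacency value list to be
-- duplicate-free, which is the List-encoding invariant of a Python set argument.
def Pre_grow_cliques_by_one (adj : List (Int × List Int)) (cliques_k : List (List Int)) : Prop :=
  (∀ c ∈ cliques_k, c ≠ [] ∧ ∀ u ∈ c, PySem.Dict.contains (PySem.Dict.mk adj) u = true) ∧
  (∀ p ∈ adj, p.2.Nodup)
instance (adj : List (Int × List Int)) (cliques_k : List (List Int)) : Decidable (Pre_grow_cliques_by_one adj cliques_k) := by unfold Pre_grow_cliques_by_one; infer_instance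

def pvWitness_grow_cliques_by_one : (List (Int × List Int)) × List (List Int) :=
  ([(1, [2, 3]), (2, [1, 3]), (3, [1, 2])], [[1, 2], [1, 3], [2, 3]])

def Spec_grow_cliques_by_one (adj : List (Int × List Int)) (cliques_k : List (List Int)) (out : List (List Int)) : Prop := out = grow_cliques_by_one_alt adj cliques_k
instance (adj : List (Int × List Int)) (cliques_k : List (List Int)) (out : List (List Int)) : Decidable (Spec_grow_cliques_by_one adj cliques_k out) := by unfold Spec_grow_cliques_by_one; infer_instance

-- ===== CLAIM (what is proved, stated in full; the proofs are below) =====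
def Claim_equal_grow_cliques_by_one : Prop := ∀ (adj : List (Int × List Int)) (cliques_k : List (List Int)), Dom_grow_cliques_by_one adj cliques_k → Pre_grow_cliques_by_one adj cliques_k → Spec_grow_cliques_by_one adj cliques_k (grow_cliques_by_one adj cliques_k)

-- ===== LEMMAS AND PROOFS =====

-- adj.getD returns either a value stored in adj or the default; so it is Nodup under Pre_.
theorem pv_getD_nodup (adj : List (Int × List Int)) (u : Int)
    (h : ∀ p ∈ adj, p.2.Nodup) : (pvAdjGet adj u).Nodup := by
  induction adj with
  | nil => exact List.nodup_nil
  | cons p t ih =>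
      have hstep : pvAdjGet (p :: t) u =
          if (p.1 == u) = true then p.2 else pvAdjGet t u := by
        simp only [pvAdjGet, PySem.Dict.getD_eq_get?_getD]
        rw [show (PySem.Dict.mk (p :: t)) = PySem.Dict.mk ((p.1, p.2) :: t) from by simp,
            PySem.Dict.get?_mk_cons]
        split_ifs <;> rfl
      rw [hstep]
      split_ifs with hk
      · exact h p (by simp)
      · exact ih (fun q hq => h q (by simp [hq]))

-- membership in the running intersection accumulated by A's inner loop
theorem pv_mem_foldl_inter (x : Int) (l : List Int) (s : PySem.Set Int)
    (g : Int → List Int) :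
    x ∈ l.foldl (fun s u => PySem.Set.inter s (g u)) s ↔ x ∈ s ∧ ∀ u ∈ l, x ∈ g u := by
  induction l generalizing s with
  | nil => simp
  | cons u t ih =>
      simp only [List.foldl_cons, ih, PySem.Set.mem_inter, List.mem_cons]
      constructor
      · rintro ⟨⟨hs, hu⟩, ht⟩
        exact ⟨hs, fun v hv => by rcases hv with rfl | hv; exact hu; exact ht v hv⟩
      · rintro ⟨hs, hall⟩
        exact ⟨⟨hs, hall u (Or.inl rfl)⟩, fun v hv => hall v (Or.inr hv)⟩

theorem pv_nodup_foldl_inter (l : List Int) (s : PySem.Set Int) (g : Int → List Int)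
    (hs : s.Nodup) : (l.foldl (fun s u => PySem.Set.inter s (g u)) s).Nodup := by
  induction l generalizing s with
  | nil => exact hs
  | cons u t ih => exact ih _ (PySem.Set.nodup_inter _ _ hs)

-- per-clique agreement: A's sorted filtered intersection equals B's filtered sorted neighbor list
theorem pv_clique_eq (adj : List (Int × List Int)) (c : List Int)
    (hne : c ≠ []) (hnd : ∀ p ∈ adj, p.2.Nodup) :
    PySem.List.sorted
      (((PySem.List.slice c (some 1) none).foldl
          (fun s u => PySem.Set.inter s (pvAdjGet adj u))
          (PySem.Set.ofList (pvAdjGet adj (PySem.List.pyGetD c 0 0)))).filter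
        (fun x => decide (PySem.List.pyGetD c (-1) 0 < x)))
      (fun x => x) false =
    (PySem.List.sorted (pvAdjGet adj (PySem.List.pyGetD c (-1) 0))
        (fun x => x) false).filter
      (fun w => decide (PySem.List.pyGetD c (-1) 0 < w) &&
        (PySem.List.slice c none (some (-1))).all
          (fun u => PySem.Set.contains (pvAdjGet adj u) w)) := by
  obtain ⟨c0, ct, rfl⟩ := List.exists_cons_of_ne_nil hne
  set last := PySem.List.pyGetD (c0 :: ct) (-1) 0 with hlast
  set rest := PySem.List.slice (c0 :: ct) none (some (-1)) with hrest
  have hslice1 : PySem.List.slice (c0 :: ct) (some 1) none = ct := by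
    simpa using PySem.List.slice_from_natCast (xs := c0 :: ct) (a := 1)
  have hslice2 : rest = (c0 :: ct).dropLast := by
    simpa [hrest] using PySem.List.slice_to_neg_one (xs := c0 :: ct)
  have hget0 : PySem.List.pyGetD (c0 :: ct) (0 : Int) (0 : Int) = c0 :=
    PySem.List.pyGetD_zero_cons c0 ct 0
  have hlastget : last = (c0 :: ct).getLast hne := by
    simpa [hlast] using PySem.List.pyGetD_neg_one (xs := c0 :: ct) (d := (0:Int)) hne
  -- decompose membership in the whole clique two ways
  have hsplit : (c0 :: ct).dropLast ++ [last] = c0 :: ct := by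
    rw [hlastget]; exact List.dropLast_concat_getLast hne
  -- the right-hand side
  apply PySem.List.sorted_eq_of_perm_of_pairwise_lt
  · -- Perm
    have hndl : (pvAdjGet adj last).Nodup := pv_getD_nodup adj last hnd
    have hnds : (PySem.List.sorted (pvAdjGet adj last) (fun x => x) false).Nodup :=
      (PySem.List.sorted_perm _ _ _).nodup_iff.mpr hndl
    have hndL : ((PySem.List.sorted (pvAdjGet adj last) (fun x => x) false).filter
        (fun w => decide (last < w) && rest.all (fun u => PySem.Set.contains (pvAdjGet adj u) w))).Nodup :=
      hnds.filter _
    have hndR : ((ct.foldl (fun s u => PySem.Set.inter s (pvAdjGet adj u))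
        (PySem.Set.ofList (pvAdjGet adj c0))).filter
        (fun x => decide (last < x))).Nodup :=
      (pv_nodup_foldl_inter ct _ _ (PySem.Set.nodup_ofList _)).filter _
    rw [hslice1, hget0]
    refine (List.perm_ext_iff_of_nodup hndL hndR).mpr ?_
    intro x
    simp only [List.mem_filter, PySem.List.mem_sorted, pv_mem_foldl_inter,
      PySem.Set.mem_ofList, Bool.and_eq_true, decide_eq_true_eq, List.all_eq_true,
      PySem.Set.contains_iff]
    constructor
    · rintro ⟨hxl, hlt, hall⟩
      have hc : ∀ u ∈ c0 :: ct, x ∈ pvAdjGet adj u := by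
        intro u hu
        rw [← hsplit] at hu
        rcases List.mem_append.mp hu with hu | hu
        · exact hall u (hslice2 ▸ hu)
        · simp at hu; subst hu; exact hxl
      exact ⟨⟨hc c0 (by simp), fun u hu => hc u (by simp [hu])⟩, hlt⟩
    · rintro ⟨⟨hc0, hct⟩, hlt⟩
      have hc : ∀ u ∈ c0 :: ct, x ∈ pvAdjGet adj u := by
        intro u hu
        rcases List.mem_cons.mp hu with rfl | hu
        · exact hc0
        · exact hct u hu
      refine ⟨?_, hlt, fun u hu => hc u ?_⟩
      · exact hc last (hsplit ▸ List.mem_append.mpr (Or.inr (by simp)))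
      · rw [← hsplit]; exact List.mem_append.mpr (Or.inl (hslice2 ▸ hu))
  · -- strictly increasing
    have hle : (PySem.List.sorted (pvAdjGet adj last) (fun x => x) false).Pairwise (· ≤ ·) := by
      simpa using PySem.List.sorted_pairwise (xs := pvAdjGet adj last) (key := fun x => x)
    have hnd' : (PySem.List.sorted (pvAdjGet adj last) (fun x => x) false).Nodup :=
      (PySem.List.sorted_perm _ _ _).nodup_iff.mpr (pv_getD_nodup adj last hnd)
    have hlt : (PySem.List.sorted (pvAdjGet adj last) (fun x => x) false).Pairwise (· < ·) :=
      (hle.and hnd').imp (fun h => lt_of_le_of_ne h.1 h.2)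
    exact hlt.filter _

-- flatMap respects pointwise agreement on members
theorem pv_flatMap_congr {α β : Type} (l : List α) (f g : α → List β)
    (h : ∀ x ∈ l, f x = g x) : l.flatMap f = l.flatMap g := by
  induction l with
  | nil => rfl
  | cons x t ih =>
      simp only [List.flatMap_cons, h x (by simp), ih (fun y hy => h y (by simp [hy]))]

-- ===== VERDICT (by name: the statement is the Claim_ definition above) =====
theorem grow_cliques_by_one_spec : Claim_equal_grow_cliques_by_one := by
  intro adj cliques_k _ hpre
  unfold Spec_grow_cliques_by_one grow_cliques_by_one grow_cliques_by_one_alt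
  obtain ⟨hcl, hnd⟩ := hpre
  -- B: collapse the inner candidate loop into filter + map
  have hB : (fun (out : List (List Int)) (c : List Int) =>
      (PySem.List.sorted (pvAdjGet adj (PySem.List.pyGetD c (-1) 0)) (fun x => x) false).foldl
        (fun out w =>
          if decide (PySem.List.pyGetD c (-1) 0 < w) &&
              (PySem.List.slice c none (some (-1))).all
                (fun u => PySem.Set.contains (pvAdjGet adj u) w)
          then out ++ [c ++ [w]] else out) out) =
      (fun out c => out ++
        ((PySem.List.sorted (pvAdjGet adj (PySem.List.pyGetD c (-1) 0)) (fun x => x) false).filter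
          (fun w => decide (PySem.List.pyGetD c (-1) 0 < w) &&
            (PySem.List.slice c none (some (-1))).all
              (fun u => PySem.Set.contains (pvAdjGet adj u) w))).map (fun w => c ++ [w])) := by
    funext out c
    exact PySem.List.foldl_append_if _ _ _ _
  rw [hB, PySem.List.foldl_append_eq_flatMap, PySem.List.foldl_append_eq_flatMap]
  simp only [List.nil_append]
  apply pv_flatMap_congr
  intro c hc
  rw [pv_clique_eq adj c (hcl c hc).1 hnd]
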